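-- pv_equiv track=rewrite | github.com/jesusprodriguezUnir/TaskManager | scripts/run_migrations.py | _strip_outer_transaction
-- ===== SOURCE A (Python) =====
-- _OUTER_TX = ("begin", "begin transaction", "commit", "end", "rollback")
--
-- def _strip_outer_transaction(sql: str) -> str:
--     """Strip leading `BEGIN;` and trailing `COMMIT;`/`END;` from a migration file.
--
--     Migration files often wrap their statements in `begin;...commit;` so they're
--     safe when run manually via psql. Our runner already wraps each file in
--     `with conn.transaction()`, and a nested SQL-level BEGIN errors out as a
--     savepoint mismatch. So strip ONLY the outermost top-level transaction
--     control statements.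
--
--     Critically, this must NOT strip `begin`/`end` inside `$$ ... $$` plpgsql
--     function bodies (where they're block markers, not transaction control).
--     Approach: walk lines, only consider stripping when not inside a $$ region,
--     and only at file start (before any other non-comment statement) or file end
--     (after all statements). Conservative: leave anything ambiguous alone.
--     """
--     lines = sql.splitlines()
--
--     # Track $$-quoted regions so we don't touch plpgsql block syntax inside them.
--     in_dollar = False
--     dollar_tag = ""
--
--     # First pass: find indices of leading BEGIN and trailing COMMIT (only when
--     # at outermost level, only at file boundaries).
--     leading_idx = -1
--     trailing_idx = -1
--     seen_real_stmt = False
--     for i, raw in enumerate(lines):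
--         # Track $$ enter/exit (very simple matcher — assumes one tag per line max)
--         if "$$" in raw:
--             # toggle each $$ found
--             count = raw.count("$$")
--             for _ in range(count):
--                 in_dollar = not in_dollar
--         if in_dollar:
--             seen_real_stmt = True
--             continue
--         stripped = raw.strip()
--         if not stripped or stripped.startswith("--"):
--             continue
--         normalized = stripped.rstrip(";").lower()
--         if normalized in _OUTER_TX:
--             if not seen_real_stmt and leading_idx == -1:
--                 leading_idx = i
--             else:
--                 trailing_idx = i  # remember the last seen one
--         else:
--             seen_real_stmt = True
--
--     out: list[str] = []
--     for i, raw in enumerate(lines):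
--         if i == leading_idx or i == trailing_idx:
--             continue
--         out.append(raw)
--     return "\n".join(out)
-- ===== SOURCE B (Python) =====
-- _OUTER_TX = ("begin", "begin transaction", "commit", "end", "rollback")
--
-- def _strip_outer_transaction(sql: str) -> str:
--     """Single pass: append lines as we go, drop the leading transaction line
--     immediately, remember the output position of the last trailing candidate
--     and delete it once at the end."""
--     out = []
--     in_dollar = False
--     seen_real = False
--     have_leading = False
--     trailing_pos = None
--     for raw in sql.splitlines():
--         if raw.count("$$") % 2 == 1:
--             in_dollar = not in_dollar
--         if in_dollar:
--             seen_real = True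
--             out.append(raw)
--             continue
--         s = raw.strip()
--         if not s or s.startswith("--"):
--             out.append(raw)
--             continue
--         if s.rstrip(";").lower() in _OUTER_TX:
--             if not seen_real and not have_leading:
--                 have_leading = True
--                 continue  # drop the leading transaction line right away
--             trailing_pos = len(out)
--             out.append(raw)
--         else:
--             seen_real = True
--             out.append(raw)
--     if trailing_pos is not None:
--         del out[trailing_pos]
--     return "\n".join(out)
-- ===== Notes on version B (the rewrite author's own statement) =====
-- stated objective: alternative
-- what changed: A's two enumerate passes (find leading/trailing indices, then re-scan and filter) are merged into one pass that emits lines as it scans, drops the leading transaction line immediately and deletes the remembered output position of the last trailing candidate once at the end; the per-line dollar-quote toggle loop is replaced by a parity test.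
import Mathlib
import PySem

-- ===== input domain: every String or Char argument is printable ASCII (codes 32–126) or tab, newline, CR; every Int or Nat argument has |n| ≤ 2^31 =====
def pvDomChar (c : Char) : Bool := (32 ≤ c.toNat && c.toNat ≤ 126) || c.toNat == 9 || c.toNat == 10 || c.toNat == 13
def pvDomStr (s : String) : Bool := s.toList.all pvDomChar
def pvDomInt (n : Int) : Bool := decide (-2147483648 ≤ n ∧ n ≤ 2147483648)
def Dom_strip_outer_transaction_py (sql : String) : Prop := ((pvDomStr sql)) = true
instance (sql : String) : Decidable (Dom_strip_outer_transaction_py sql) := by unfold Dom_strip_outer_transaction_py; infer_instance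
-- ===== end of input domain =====

-- B merges A's two passes into one: lines are appended as they are scanned, the leading
-- transaction line is dropped immediately, the trailing candidate's output position is
-- remembered and deleted once at the end (objective: alternative decomposition, same cost).

-- shared context: the _OUTER_TX tuple, and str.rstrip(";") (hand port, used verbatim by both
-- Pythons; exact: Python's rstrip(chars) removes every trailing char drawn from chars)
def pvOuterTx : List (List Char) :=
  ["begin".toList, "begin transaction".toList, "commit".toList, "end".toList, "rollback".toList]
def pvRstripSemi (cs : List Char) : List Char := (cs.reverse.dropWhile (· == ';')).reverse

-- ===== PORT A =====
-- A's inner `for _ in range(count): in_dollar = not in_dollar`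
def aToggle (n : Nat) (b : Bool) : Bool :=
  (PySem.List.pyRange 0 (n : Int) 1).foldl (fun d _ => !d) b

-- A's `if "$$" in raw: ... toggle count times`
def aDollar (raw : String) (b : Bool) : Bool :=
  if PySem.Str.isIn "$$" raw then aToggle (PySem.Str.count raw "$$") b else b

-- first pass: `for i, raw in enumerate(lines)` computing (leading_idx, trailing_idx)
def aLoop1 : List String → Nat → Bool → Bool → Int → Int → Int × Int
  | [], _, _, _, l, t => (l, t)
  | raw :: rest, k, inD, seen, l, t =>
    let inD' := aDollar raw inD
    if inD' then aLoop1 rest (k + 1) inD' true l t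
    else
      let s := PySem.Chars.strip raw.toList
      if s = [] ∨ PySem.Chars.startswith s "--".toList then aLoop1 rest (k + 1) inD' seen l t
      else if PySem.Chars.lower (pvRstripSemi s) ∈ pvOuterTx then
        if seen = false ∧ l = -1 then aLoop1 rest (k + 1) inD' seen (k : Int) t
        else aLoop1 rest (k + 1) inD' seen l (k : Int)
      else aLoop1 rest (k + 1) inD' true l t

-- second pass: `for i, raw in enumerate(lines): if i == leading or i == trailing: continue; out.append(raw)`
def aLoop2 : List String → Nat → Int → Int → List String
  | [], _, _, _ => []
  | raw :: rest, k, l, t =>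
    (if (k : Int) = l ∨ (k : Int) = t then [] else [raw]) ++ aLoop2 rest (k + 1) l t

def strip_outer_transaction_py (sql : String) : String :=
  let lines := PySem.Str.splitlines sql
  let lt := aLoop1 lines 0 false false (-1) (-1)
  PySem.Str.join "\n" (aLoop2 lines 0 lt.1 lt.2)

-- ===== PORT B =====
-- B's `if raw.count("$$") % 2 == 1: in_dollar = not in_dollar`
def bDollar (raw : String) (b : Bool) : Bool :=
  if PySem.Str.count raw "$$" % 2 = 1 then !b else b

-- B's single pass: state (in_dollar, seen_real, have_leading, out, trailing_pos)
def bLoop : List String → Bool → Bool → Bool → List String → Option Nat → List String × Option Nat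
  | [], _, _, _, out, tp => (out, tp)
  | raw :: rest, inD, seen, hl, out, tp =>
    let inD' := bDollar raw inD
    if inD' then bLoop rest inD' true hl (out ++ [raw]) tp
    else
      let s := PySem.Chars.strip raw.toList
      if s = [] ∨ PySem.Chars.startswith s "--".toList then bLoop rest inD' seen hl (out ++ [raw]) tp
      else if PySem.Chars.lower (pvRstripSemi s) ∈ pvOuterTx then
        if seen = false ∧ hl = false then bLoop rest inD' seen true out tp
        else bLoop rest inD' seen hl (out ++ [raw]) (some out.length)
      else bLoop rest inD' true hl (out ++ [raw]) tp

def strip_outer_transaction_py_alt (sql : String) : String :=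
  let r := bLoop (PySem.Str.splitlines sql) false false false [] none
  PySem.Str.join "\n" (match r.2 with | none => r.1 | some p => r.1.eraseIdx p)

-- ===== PRECONDITION & SPEC =====
def Spec_strip_outer_transaction_py (sql : String) (out : String) : Prop := out = strip_outer_transaction_py_alt sql
instance (sql : String) (out : String) : Decidable (Spec_strip_outer_transaction_py sql out) := by unfold Spec_strip_outer_transaction_py; infer_instance

-- ===== CLAIM (what is proved, stated in full; the proofs are below) =====
def Claim_equal_strip_outer_transaction_py : Prop := ∀ (sql : String), Dom_strip_outer_transaction_py sql → Spec_strip_outer_transaction_py sql (strip_outer_transaction_py sql)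

-- ===== LEMMAS AND PROOFS =====

-- a line with no "$$" occurrence has count 0 (unwinding PySem.Chars.count.go's fuel recursion)
lemma count_go_of_no_occ (sub : List Char) :
    ∀ (fuel : Nat) (l : List Char) (acc : Nat),
      (∀ l', l' <:+ l → ¬ sub.isPrefixOf l') → PySem.Chars.count.go sub fuel l acc = acc := by
  intro fuel
  induction fuel with
  | zero => intro l acc _; cases l <;> rfl
  | succ n ih =>
    intro l acc h
    cases l with
    | nil => rfl
    | cons x xs =>
      rw [PySem.Chars.count.go]
      simp only [h (x :: xs) (List.suffix_refl _)]
      exact ih xs acc fun l' hl' => h l' (hl'.trans (List.suffix_cons x xs))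

lemma count_eq_zero_of_not_isIn (s sub : List Char) (hne : sub ≠ [])
    (h : PySem.Chars.isIn sub s = false) : PySem.Chars.count s sub = 0 := by
  rw [PySem.Chars.isIn_eq_false_iff] at h
  unfold PySem.Chars.count
  rw [if_neg (by simpa using hne)]
  refine count_go_of_no_occ sub s.length s 0 fun l' hl' hp => h ?_
  exact List.infix_iff_prefix_suffix.mpr ⟨l', List.isPrefixOf_iff_prefix.mp hp, hl'⟩

lemma foldl_not_parity (L : List α) : ∀ b : Bool,
    L.foldl (fun d _ => !d) b = if L.length % 2 = 1 then !b else b := by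
  induction L with
  | nil => intro b; simp
  | cons x xs ih =>
    intro b
    simp only [List.foldl_cons, ih, List.length_cons]
    have hiff : (xs.length + 1) % 2 = 1 ↔ ¬ xs.length % 2 = 1 := by omega
    by_cases hb : xs.length % 2 = 1 <;> simp [hb, hiff]

-- A's toggle loop and B's parity test produce the same in_dollar
lemma toggle_eq (raw : String) (b : Bool) : aDollar raw b = bDollar raw b := by
  unfold aDollar bDollar
  have hto : ∀ n, aToggle n b = if n % 2 = 1 then !b else b := by
    intro n
    unfold aToggle
    rw [foldl_not_parity]
    have : (PySem.List.pyRange 0 (n : Int) 1).length = n := by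
      simp [PySem.List.pyRange_zero_natCast]
    rw [this]
  have e : "$$".toList = ['$', '$'] := rfl
  by_cases h : PySem.Str.isIn "$$" raw
  · simp only [PySem.Str.isIn, e] at h
    simp [PySem.Str.isIn, PySem.Str.count, e, h, hto]
  · have h0 : PySem.Str.count raw "$$" = 0 := by
      apply count_eq_zero_of_not_isIn _ _ (by decide)
      simpa [PySem.Str.isIn] using h
    simp only [PySem.Str.isIn, e] at h
    simp only [PySem.Str.count, e] at h0
    simp [PySem.Str.isIn, PySem.Str.count, e, h, h0]

-- aLoop1 only writes indices ≥ k
lemma aLoop1_bounds : ∀ (rest : List String) (k : Nat) (inD seen : Bool) (l t : Int),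
    ((aLoop1 rest k inD seen l t).1 = l ∨ (k : Int) ≤ (aLoop1 rest k inD seen l t).1) ∧
    ((aLoop1 rest k inD seen l t).2 = t ∨ (k : Int) ≤ (aLoop1 rest k inD seen l t).2) := by
  intro rest
  induction rest with
  | nil => intro k inD seen l t; simp [aLoop1]
  | cons raw rest ih =>
    intro k inD seen l t
    unfold aLoop1
    simp only []
    split_ifs with h1 h2 h3 h4
    all_goals refine ⟨?_, ?_⟩
    all_goals
      first
        | (rcases (ih (k+1) (aDollar raw inD) true l t).1 with h | h <;> omega)
        | (rcases (ih (k+1) (aDollar raw inD) true l t).2 with h | h <;> omega)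
        | (rcases (ih (k+1) (aDollar raw inD) seen l t).1 with h | h <;> omega)
        | (rcases (ih (k+1) (aDollar raw inD) seen l t).2 with h | h <;> omega)
        | (rcases (ih (k+1) (aDollar raw inD) seen (k : Int) t).1 with h | h <;> omega)
        | (rcases (ih (k+1) (aDollar raw inD) seen (k : Int) t).2 with h | h <;> omega)
        | (rcases (ih (k+1) (aDollar raw inD) seen l (k : Int)).1 with h | h <;> omega)
        | (rcases (ih (k+1) (aDollar raw inD) seen l (k : Int)).2 with h | h <;> omega)

-- once leading_idx is set it never changes
lemma aLoop1_lead_fix : ∀ (rest : List String) (k : Nat) (inD seen : Bool) (l t : Int),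
    l ≠ -1 → (aLoop1 rest k inD seen l t).1 = l := by
  intro rest
  induction rest with
  | nil => intro k inD seen l t _; rfl
  | cons raw rest ih =>
    intro k inD seen l t hl
    unfold aLoop1
    simp only []
    split_ifs with h1 h2 h3 h4 <;> first | exact ih _ _ _ _ _ hl | exact absurd h4.2 hl

def prefCut (out : List String) : Option Nat → List String
  | none => out
  | some p => out.eraseIdx p

-- the main invariant: running both loops from related states gives B's final list
-- = (prefix already emitted, with the pending trailing candidate cut iff it survives)
--   ++ A's second-pass filter of the remaining lines
lemma main_inv : ∀ (rest : List String) (k : Nat) (inD seen : Bool) (l t : Int)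
    (out : List String) (tp : Option Nat),
    l < (k : Int) → t < (k : Int) →
    (t = -1 ↔ tp = none) →
    (∀ p, tp = some p → p < out.length) →
    (t ≠ -1 → seen = true ∨ l ≠ -1) →
    prefCut (bLoop rest inD seen (decide (l ≠ -1)) out tp).1 (bLoop rest inD seen (decide (l ≠ -1)) out tp).2
      = (if (aLoop1 rest k inD seen l t).2 = t then prefCut out tp else out)
        ++ aLoop2 rest k (aLoop1 rest k inD seen l t).1 (aLoop1 rest k inD seen l t).2 := by
  intro rest
  induction rest with
  | nil =>
    intro k inD seen l t out tp _ _ _ _ _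
    simp [aLoop1, bLoop, aLoop2]
  | cons raw rest ih =>
    intro k inD seen l t out tp hlk htk hiff hplen himp
    have hcut : ∀ (r : String), prefCut (out ++ [r]) tp = prefCut out tp ++ [r] := by
      intro r
      cases tp with
      | none => rfl
      | some p => exact List.eraseIdx_append_of_lt_length (hplen p rfl) [r]
    have hite : ∀ (c : Prop) [Decidable c] (r : String),
        (if c then prefCut out tp ++ [r] else out ++ [r])
          = (if c then prefCut out tp else out) ++ [r] := by
      intro c _ r; split_ifs <;> rfl
    unfold aLoop1 bLoop aLoop2
    simp only []
    rw [← toggle_eq]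
    simp only [decide_eq_false_iff_not, ne_eq, not_not]
    by_cases h1 : aDollar raw inD = true
    · -- inside a $$ region
      simp only [if_pos h1]
      rw [ih (k + 1) _ true l t (out ++ [raw]) tp (by omega) (by omega) hiff
            (fun p hp => by simpa using Nat.lt_succ_of_lt (hplen p hp))
            (fun _ => Or.inl rfl), hcut, hite]
      rcases (aLoop1_bounds rest (k + 1) (aDollar raw inD) true l t).1 with hL | hL <;>
        rcases (aLoop1_bounds rest (k + 1) (aDollar raw inD) true l t).2 with hT | hT <;>
        split_ifs <;> first | (simp; done) | (exfalso; omega)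
    · simp only [if_neg h1]
      by_cases h2 : PySem.Chars.strip raw.toList = [] ∨
          PySem.Chars.startswith (PySem.Chars.strip raw.toList) "--".toList = true
      · -- blank line or comment
        simp only [if_pos h2]
        rw [ih (k + 1) _ seen l t (out ++ [raw]) tp (by omega) (by omega) hiff
              (fun p hp => by simpa using Nat.lt_succ_of_lt (hplen p hp)) himp, hcut, hite]
        rcases (aLoop1_bounds rest (k + 1) (aDollar raw inD) seen l t).1 with hL | hL <;>
          rcases (aLoop1_bounds rest (k + 1) (aDollar raw inD) seen l t).2 with hT | hT <;>
          split_ifs <;> first | (simp; done) | (exfalso; omega)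
      · simp only [if_neg h2]
        by_cases h3 : PySem.Chars.lower (pvRstripSemi (PySem.Chars.strip raw.toList)) ∈ pvOuterTx
        · simp only [if_pos h3]
          by_cases h4 : seen = false ∧ l = -1
          · -- transaction line at the leading position
            simp only [if_pos h4]
            have ht1 : t = -1 := by
              by_contra hne
              rcases himp hne with hs | hl
              · rw [h4.1] at hs; cases hs
              · exact hl h4.2
            have htp : tp = none := hiff.mp ht1
            subst htp
            have hdk : (true : Bool) = decide (¬ ((k : Int) = -1)) := by simp
            rw [hdk,
              ih (k + 1) _ seen (k : Int) t out none (by omega) (by omega)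
                (by simp [ht1]) (fun p hp => by cases hp) (fun ht => absurd ht1 ht)]
            have hfix := aLoop1_lead_fix rest (k + 1) (aDollar raw inD) seen (k : Int) t (by omega)
            rw [if_pos (Or.inl hfix.symm)]
            simp [prefCut]
          · -- transaction line at the trailing position
            simp only [if_neg h4]
            have hne : ¬ ((k : Int) = -1) := by omega
            rw [ih (k + 1) _ seen l (k : Int) (out ++ [raw]) (some out.length) (by omega) (by omega)
                  ⟨fun hh => absurd hh hne, fun hh => by cases hh⟩
                  (fun p hp => by injection hp with h; subst h; simp)
                  (fun _ => by
                    rcases Bool.eq_false_or_eq_true seen with hs | hs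
                    · exact Or.inl hs
                    · exact Or.inr (fun hl0 => h4 ⟨hs, hl0⟩))]
            have hpc : prefCut (out ++ [raw]) (some out.length) = out := by
              show (out ++ [raw]).eraseIdx out.length = out
              rw [List.eraseIdx_append_of_length_le (le_refl _)]
              simp
            rw [hpc]
            rcases (aLoop1_bounds rest (k + 1) (aDollar raw inD) seen l (k : Int)).1 with hL | hL <;>
              rcases (aLoop1_bounds rest (k + 1) (aDollar raw inD) seen l (k : Int)).2 with hT | hT <;>
              split_ifs <;> first | (simp; done) | (exfalso; omega)
        · -- a real statement
          simp only [if_neg h3]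
          rw [ih (k + 1) _ true l t (out ++ [raw]) tp (by omega) (by omega) hiff
                (fun p hp => by simpa using Nat.lt_succ_of_lt (hplen p hp))
                (fun _ => Or.inl rfl), hcut, hite]
          rcases (aLoop1_bounds rest (k + 1) (aDollar raw inD) true l t).1 with hL | hL <;>
            rcases (aLoop1_bounds rest (k + 1) (aDollar raw inD) true l t).2 with hT | hT <;>
            split_ifs <;> first | (simp; done) | (exfalso; omega)

theorem strip_outer_transaction_py_spec : Claim_equal_strip_outer_transaction_py := by
  intro sql _
  unfold Spec_strip_outer_transaction_py strip_outer_transaction_py strip_outer_transaction_py_alt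
  have h := main_inv (PySem.Str.splitlines sql) 0 false false (-1) (-1) [] none
    (by norm_num) (by norm_num) (by simp) (by simp) (by simp)
  have e : (decide ((-1 : Int) ≠ -1)) = false := by decide
  rw [e] at h
  simp only [prefCut, ite_self, List.nil_append] at h
  show PySem.Str.join "\n" _ = PySem.Str.join "\n" _
  congr 1
  exact h.symm
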